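-- pv_equiv track=rewrite | github.com/AlexKirkup90/running_app | core/services/planning.py | _choose_day_for_session
-- ===== SOURCE A (Python) =====
-- def _choose_day_for_session(
--     available_days: set[int],
--     ordered_candidates: list[int],
--     is_quality: bool,
--     quality_days: set[int],
-- ) -> int:
--     if not available_days:
--         raise ValueError("No available days remain for session assignment")
--     ranked = [d for d in ordered_candidates if d in available_days]
--     ranked.extend(sorted(d for d in available_days if d not in ranked))
--     if not is_quality:
--         return ranked[0]
--
--     def violates(day: int) -> bool:
--         return (day - 1 in quality_days) or (day + 1 in quality_days)
--
--     safe = [d for d in ranked if not violates(d)]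
--     return safe[0] if safe else ranked[0]
-- ===== SOURCE B (Python) =====
-- def _choose_day_for_session(
--     available_days: set[int],
--     ordered_candidates: list[int],
--     is_quality: bool,
--     quality_days: set[int],
-- ) -> int:
--     if not available_days:
--         raise ValueError("No available days remain for session assignment")
--     # Rank table: each day's first position in ordered_candidates; unknown days rank last.
--     priority: dict[int, int] = {}
--     for i, d in enumerate(ordered_candidates):
--         priority.setdefault(d, i)
--     fallback = len(ordered_candidates)
--
--     def key(d: int) -> tuple[int, int]:
--         return (priority.get(d, fallback), d)
--
--     if is_quality:
--         safe = [d for d in available_days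
--                 if d - 1 not in quality_days and d + 1 not in quality_days]
--         if safe:
--             return min(safe, key=key)
--     return min(available_days, key=key)
-- ===== Notes on version B (the rewrite author's own statement) =====
-- stated objective: faster
-- what changed: A materialises a ranked list (filter candidates, quadratic 'd not in ranked' scan plus a sort to append the rest) and filters it; B instead builds a first-occurrence priority dict over ordered_candidates once and picks the day directly with min(..., key=(priority, day)), no ranked list, no membership scan, no sort.
import Mathlib
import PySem

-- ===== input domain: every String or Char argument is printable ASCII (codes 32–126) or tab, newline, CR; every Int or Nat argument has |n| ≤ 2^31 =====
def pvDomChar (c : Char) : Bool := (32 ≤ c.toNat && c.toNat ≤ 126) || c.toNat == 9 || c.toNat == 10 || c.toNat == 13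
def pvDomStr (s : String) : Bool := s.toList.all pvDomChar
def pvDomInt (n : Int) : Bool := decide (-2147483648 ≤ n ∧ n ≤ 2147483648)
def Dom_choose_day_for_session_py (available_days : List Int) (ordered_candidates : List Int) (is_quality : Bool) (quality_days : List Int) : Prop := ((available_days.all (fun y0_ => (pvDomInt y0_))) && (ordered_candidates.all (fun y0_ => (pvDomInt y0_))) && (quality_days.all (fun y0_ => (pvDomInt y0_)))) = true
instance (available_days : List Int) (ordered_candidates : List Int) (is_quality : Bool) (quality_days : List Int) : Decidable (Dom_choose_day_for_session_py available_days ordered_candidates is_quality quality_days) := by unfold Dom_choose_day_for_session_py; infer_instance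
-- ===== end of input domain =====

-- B replaces A's build-ranked-list-then-filter (with its quadratic membership scan and sort) by a
-- first-occurrence priority dict plus a single min-with-key selection over the available days (objective: faster).

-- ===== PORT A =====
-- A-side helpers: A's local list 'ranked' (candidate part, then sorted remainder), named so the lemmas can speak about it
def pvRanked1 (available_days ordered_candidates : List Int) : List Int :=
  -- ranked = [d for d in ordered_candidates if d in available_days]
  ordered_candidates.filter (fun d => available_days.contains d)

def pvRanked (available_days ordered_candidates : List Int) : List Int :=
  -- ranked.extend(sorted(d for d in available_days if d not in ranked))
  pvRanked1 available_days ordered_candidates ++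
    PySem.List.sorted (available_days.filter
      (fun d => !((pvRanked1 available_days ordered_candidates).contains d))) (fun x => x) false

def choose_day_for_session_py (available_days : List Int) (ordered_candidates : List Int) (is_quality : Bool) (quality_days : List Int) : Int :=
  let ranked := pvRanked available_days ordered_candidates
  if !is_quality then
    (PySem.List.pyGet? ranked 0).getD 0   -- ranked[0]; Pre_ guarantees ranked ≠ [], so pyGet? is some
  else
    let violates := fun (day : Int) => quality_days.contains (day - 1) || quality_days.contains (day + 1)
    let safe := ranked.filter (fun d => !(violates d))
    if safe ≠ [] then (PySem.List.pyGet? safe 0).getD 0 else (PySem.List.pyGet? ranked 0).getD 0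

-- ===== PORT B =====
-- priority = {}; for i, d in enumerate(ordered_candidates): priority.setdefault(d, i)
def pvPriority (ordered_candidates : List Int) : PySem.Dict Int Int :=
  (PySem.List.enumerate ordered_candidates 0).foldl
    (fun d p => PySem.Dict.setdefault d p.2 p.1) PySem.Dict.empty

def choose_day_for_session_py_alt (available_days : List Int) (ordered_candidates : List Int) (is_quality : Bool) (quality_days : List Int) : Int :=
  let priority := pvPriority ordered_candidates
  let fallback : Int := ordered_candidates.length
  -- key(d) = (priority.get(d, fallback), d); min(..., key=key) is min2? with this key pair
  let k1 := fun (d : Int) => priority.getD d fallback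
  if is_quality then
    let safe := available_days.filter
      (fun d => !(quality_days.contains (d - 1)) && !(quality_days.contains (d + 1)))
    if safe ≠ [] then
      (PySem.List.min2? safe k1 (fun d => d)).getD 0       -- min(safe, key=key); safe ≠ [] ⇒ some
    else
      (PySem.List.min2? available_days k1 (fun d => d)).getD 0  -- min(available_days, key=key); Pre_ ⇒ some
  else
    (PySem.List.min2? available_days k1 (fun d => d)).getD 0

-- ===== PRECONDITION & SPEC =====
-- Pre_ excludes exactly the inputs on which A raises ValueError (empty available_days); B raises there too.
def Pre_choose_day_for_session_py (available_days : List Int) (ordered_candidates : List Int) (is_quality : Bool) (quality_days : List Int) : Prop :=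
  available_days ≠ []
instance (available_days : List Int) (ordered_candidates : List Int) (is_quality : Bool) (quality_days : List Int) : Decidable (Pre_choose_day_for_session_py available_days ordered_candidates is_quality quality_days) := by unfold Pre_choose_day_for_session_py; infer_instance
def pvWitness_choose_day_for_session_py : List Int × List Int × Bool × List Int := ([1, 3], [3, 5], true, [2])
def Spec_choose_day_for_session_py (available_days : List Int) (ordered_candidates : List Int) (is_quality : Bool) (quality_days : List Int) (out : Int) : Prop := out = choose_day_for_session_py_alt available_days ordered_candidates is_quality quality_days
instance (available_days : List Int) (ordered_candidates : List Int) (is_quality : Bool) (quality_days : List Int) (out : Int) : Decidable (Spec_choose_day_for_session_py available_days ordered_candidates is_quality quality_days out) := by unfold Spec_choose_day_for_session_py; infer_instance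

-- ===== CLAIM (what is proved, stated in full; the proofs are below) =====
def Claim_equal_choose_day_for_session_py : Prop := ∀ (available_days : List Int) (ordered_candidates : List Int) (is_quality : Bool) (quality_days : List Int), Dom_choose_day_for_session_py available_days ordered_candidates is_quality quality_days → Pre_choose_day_for_session_py available_days ordered_candidates is_quality quality_days → Spec_choose_day_for_session_py available_days ordered_candidates is_quality quality_days (choose_day_for_session_py available_days ordered_candidates is_quality quality_days)

-- ===== LEMMAS AND PROOFS =====

-- first-occurrence index of x in oc, or oc.length if absent (the value B's priority dict realises)
def pvRank : List Int → Int → Int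
  | [], _ => 0
  | c :: t, x => if x = c then 0 else pvRank t x + 1

theorem pvRank_nonneg (oc : List Int) (x : Int) : 0 ≤ pvRank oc x := by
  induction oc with
  | nil => simp [pvRank]
  | cons c t ih => unfold pvRank; split <;> omega

theorem pvRank_of_not_mem (oc : List Int) (x : Int) (h : x ∉ oc) : pvRank oc x = oc.length := by
  induction oc with
  | nil => simp [pvRank]
  | cons c t ih =>
    have hx : x ≠ c := by intro he; exact h (by simp [he])
    have ht : x ∉ t := fun hm => h (by simp [hm])
    simp [pvRank, hx, ih ht]

theorem pvRank_lt_of_mem (oc : List Int) (x : Int) (h : x ∈ oc) : pvRank oc x < oc.length := by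
  induction oc with
  | nil => simp at h
  | cons c t ih =>
    unfold pvRank
    split
    · simp
    · next hne =>
      have hxt : x ∈ t := by rcases List.mem_cons.mp h with h | h; exact absurd h hne; exact h
      have := ih hxt
      simp only [List.length_cons]
      push_cast
      omega

theorem pvRank_inj (oc : List Int) (x y : Int) (hx : x ∈ oc) (hy : y ∈ oc)
    (h : pvRank oc x = pvRank oc y) : x = y := by
  induction oc with
  | nil => simp at hx
  | cons c t ih =>
    by_cases hxc : x = c <;> by_cases hyc : y = c
    · omega
    · exfalso
      have hyt : y ∈ t := by rcases List.mem_cons.mp hy with h' | h'; exact absurd h' hyc; exact h'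
      have := pvRank_nonneg t y
      simp [pvRank, hxc, hyc] at h
      omega
    · exfalso
      have hxt : x ∈ t := by rcases List.mem_cons.mp hx with h' | h'; exact absurd h' hxc; exact h'
      have := pvRank_nonneg t x
      simp [pvRank, hxc, hyc] at h
      omega
    · have hxt : x ∈ t := by rcases List.mem_cons.mp hx with h' | h'; exact absurd h' hxc; exact h'
      have hyt : y ∈ t := by rcases List.mem_cons.mp hy with h' | h'; exact absurd h' hyc; exact h'
      apply ih hxt hyt
      simp [pvRank, hxc, hyc] at h
      omega

-- the setdefault loop computes the first-occurrence index
theorem pvPriority_foldl (oc : List Int) (x : Int) : ∀ (s : Int) (dict : PySem.Dict Int Int),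
    ((PySem.List.enumerate oc s).foldl (fun d p => PySem.Dict.setdefault d p.2 p.1) dict).get? x
      = (dict.get? x).or (if x ∈ oc then some (s + pvRank oc x) else none) := by
  induction oc with
  | nil => intro s dict; simp [PySem.List.enumerate_nil]
  | cons c t ih =>
    intro s dict
    rw [PySem.List.enumerate_cons]
    simp only [List.foldl_cons]
    rw [ih (s + 1) (dict.setdefault c s)]
    by_cases hx : x = c
    · subst hx
      rw [PySem.Dict.get?_setdefault_self]
      cases hdx : dict.get? x with
      | none => simp [pvRank]
      | some v => simp [pvRank]
    · rw [PySem.Dict.get?_setdefault_of_ne _ _ hx]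
      have hmem : (x ∈ c :: t) ↔ (x ∈ t) := by simp [hx]
      have harith : s + 1 + pvRank t x = s + (pvRank t x + 1) := by omega
      simp only [hmem, pvRank, if_neg hx, harith]

theorem pvPriority_getD (oc : List Int) (x : Int) :
    (pvPriority oc).getD x (oc.length : Int) = pvRank oc x := by
  unfold pvPriority
  rw [PySem.Dict.getD_eq_get?_getD, pvPriority_foldl oc x 0 PySem.Dict.empty]
  by_cases hx : x ∈ oc
  · simp [hx]
  · simp [hx, pvRank_of_not_mem oc x hx]

-- lex order on the key (pvRank oc ·, ·)
def pvLexLe (k1 : Int → Int) (a b : Int) : Prop := k1 a < k1 b ∨ (k1 a = k1 b ∧ a ≤ b)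

-- min2? with identity second key returns a lex-minimal element
theorem pv_min2_foldl_spec (k1 : Int → Int) (xs : List Int) : ∀ (a m : Int),
    xs.foldl (fun acc x => match acc with
      | none => some x
      | some m => if (decide (k1 x < k1 m) || !decide (k1 m < k1 x) && decide (x < m)) = true then some x else some m)
      (some a) = some m →
    (m = a ∨ m ∈ xs) ∧ pvLexLe k1 m a ∧ ∀ e ∈ xs, pvLexLe k1 m e := by
  induction xs with
  | nil =>
    intro a m h
    simp at h
    exact ⟨Or.inl h.symm, by simp [pvLexLe, h], by simp⟩
  | cons x t ih =>
    intro a m h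
    simp only [List.foldl_cons] at h
    by_cases hc : (decide (k1 x < k1 a) || !decide (k1 a < k1 x) && decide (x < a)) = true
    · rw [if_pos hc] at h
      obtain ⟨hm1, hm2, hm3⟩ := ih x m h
      have hxa : pvLexLe k1 x a := by
        simp only [Bool.or_eq_true, Bool.and_eq_true, decide_eq_true_eq, Bool.not_eq_true',
          decide_eq_false_iff_not] at hc
        unfold pvLexLe
        omega
      have hma : pvLexLe k1 m a := by
        unfold pvLexLe at hm2 hxa ⊢
        omega
      refine ⟨?_, hma, ?_⟩
      · rcases hm1 with h' | h'
        · exact Or.inr (by simp [h'])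
        · exact Or.inr (by simp [h'])
      · intro e he
        rcases List.mem_cons.mp he with rfl | he'
        · exact hm2
        · exact hm3 e he'
    · rw [if_neg hc] at h
      obtain ⟨hm1, hm2, hm3⟩ := ih a m h
      have hax : pvLexLe k1 a x := by
        simp only [Bool.or_eq_true, Bool.and_eq_true, decide_eq_true_eq, Bool.not_eq_true',
          decide_eq_false_iff_not, not_or, not_and, not_lt] at hc
        unfold pvLexLe
        omega
      refine ⟨?_, hm2, ?_⟩
      · rcases hm1 with h' | h'
        · exact Or.inl h'
        · exact Or.inr (by simp [h'])
      · intro e he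
        rcases List.mem_cons.mp he with rfl | he'
        · unfold pvLexLe at hm2 hax ⊢
          omega
        · exact hm3 e he'

theorem pv_min2_eq_foldl (k1 : Int → Int) (xs : List Int) :
    PySem.List.min2? xs k1 (fun d => d) = xs.foldl (fun acc x => match acc with
      | none => some x
      | some m => if (decide (k1 x < k1 m) || !decide (k1 m < k1 x) && decide (x < m)) = true then some x else some m) none := by
  unfold PySem.List.min2?
  congr 1
  funext acc x
  cases acc <;> rfl

theorem pv_min2_spec (k1 : Int → Int) (xs : List Int) (m : Int)
    (h : PySem.List.min2? xs k1 (fun d => d) = some m) :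
    m ∈ xs ∧ ∀ e ∈ xs, pvLexLe k1 m e := by
  cases xs with
  | nil => simp [PySem.List.min2?] at h
  | cons x t =>
    rw [pv_min2_eq_foldl] at h
    simp only [List.foldl_cons] at h
    obtain ⟨h1, h2, h3⟩ := pv_min2_foldl_spec k1 t x m h
    refine ⟨?_, ?_⟩
    · rcases h1 with h' | h'
      · simp [h']
      · simp [h']
    · intro e he
      rcases List.mem_cons.mp he with rfl | he'
      · exact h2
      · exact h3 e he'

theorem pv_min2_eq_none_iff (k1 : Int → Int) (xs : List Int) :
    PySem.List.min2? xs k1 (fun d => d) = none ↔ xs = [] := by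
  constructor
  · intro h
    cases xs with
    | nil => rfl
    | cons x t =>
      exfalso
      rw [pv_min2_eq_foldl] at h
      simp only [List.foldl_cons] at h
      -- a fold starting from some _ stays some
      have : ∀ (l : List Int) (a : Int), l.foldl (fun acc x => match acc with
        | none => some x
        | some m => if (decide (k1 x < k1 m) || !decide (k1 m < k1 x) && decide (x < m)) = true then some x else some m)
        (some a) ≠ none := by
        intro l
        induction l with
        | nil => intro a; simp
        | cons y s ih =>
          intro a
          simp only [List.foldl_cons]
          split <;> apply ih
      exact this t x h
  · intro h; subst h; rfl

theorem pv_min2_eq_some (k1 : Int → Int) (xs : List Int) (d : Int)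
    (hd : d ∈ xs) (hlb : ∀ e ∈ xs, pvLexLe k1 d e) :
    PySem.List.min2? xs k1 (fun x => x) = some d := by
  cases hm : PySem.List.min2? xs k1 (fun x => x) with
  | none =>
    exact absurd ((pv_min2_eq_none_iff k1 xs).mp hm ▸ hd) (by simp)
  | some m =>
    obtain ⟨hmem, hmin⟩ := pv_min2_spec k1 xs m hm
    have h1 := hmin d hd
    have h2 := hlb m hmem
    have : m = d := by
      rcases h1 with h1 | ⟨h1, h1'⟩ <;> rcases h2 with h2 | ⟨h2, h2'⟩ <;> omega
    rw [this]

theorem pv_pyGet?_zero (xs : List Int) : PySem.List.pyGet? xs 0 = xs.head? := by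
  cases xs <;> simp [PySem.List.pyGet?, PySem.List.pyIdx?]

-- head of a filtered list: in the list, passes the filter
theorem pv_head_filter (l : List Int) (q : Int → Bool) (d : Int)
    (h : (l.filter q).head? = some d) : d ∈ l ∧ q d = true := by
  have hd : d ∈ l.filter q := List.mem_of_mem_head? (by simp [h])
  exact ⟨(List.mem_filter.mp hd).1, (List.mem_filter.mp hd).2⟩

-- head of (oc.filter P) has minimal pvRank among members of oc satisfying P
theorem pv_head_rank_min (oc : List Int) (P : Int → Bool) (d : Int)
    (h : (oc.filter P).head? = some d) :
    ∀ e ∈ oc, P e = true → pvRank oc d ≤ pvRank oc e := by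
  induction oc with
  | nil => simp at h
  | cons c t ih =>
    rw [List.filter_cons] at h
    by_cases hc : P c
    · rw [if_pos hc] at h
      simp at h
      intro e he hPe
      subst h
      have := pvRank_nonneg (c :: t) e
      simp [pvRank]
      split <;> [omega; (have := pvRank_nonneg t e; omega)]
    · rw [if_neg (by simpa using hc)] at h
      obtain ⟨hdt, hPd⟩ := pv_head_filter t P d h
      have hdc : d ≠ c := by intro he; rw [he] at hPd; exact hc hPd
      intro e he hPe
      have hec : e ≠ c := by intro he'; rw [he'] at hPe; exact hc hPe
      have het : e ∈ t := by rcases List.mem_cons.mp he with h' | h'; exact absurd h' hec; exact h'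
      have := ih h e het hPe
      simp [pvRank, hdc, hec]
      omega

-- head of the filter of a ≤-sorted list is ≤ every member passing the filter
theorem pv_head_sorted_filter_le (l : List Int) (q : Int → Bool) (d : Int)
    (hs : l.Pairwise (· ≤ ·)) (h : (l.filter q).head? = some d) :
    ∀ e ∈ l, q e = true → d ≤ e := by
  induction l with
  | nil => simp at h
  | cons c t ih =>
    rw [List.filter_cons] at h
    obtain ⟨hc1, hc2⟩ := List.pairwise_cons.mp hs
    by_cases hc : q c
    · rw [if_pos hc] at h
      simp at h
      subst h
      intro e he _
      rcases List.mem_cons.mp he with rfl | he'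
      · omega
      · exact hc1 e he'
    · rw [if_neg (by simpa using hc)] at h
      intro e he hqe
      rcases List.mem_cons.mp he with rfl | he'
      · exact absurd hqe hc
      · exact ih hc2 h e he' hqe

-- CORE: the head of A's filtered ranked list IS B's min-with-key over the filtered available days
theorem pv_core (available_days ordered_candidates : List Int) (q : Int → Bool) :
    ((pvRanked available_days ordered_candidates).filter q).head?
      = PySem.List.min2? (available_days.filter q)
          (fun d => pvRank ordered_candidates d) (fun d => d) := by
  set oc := ordered_candidates
  set r1 := pvRanked1 available_days oc with hr1
  set rest := available_days.filter (fun d => !(r1.contains d)) with hrest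
  have hmem_r1 : ∀ x, x ∈ r1 ↔ (x ∈ oc ∧ x ∈ available_days) := by
    intro x
    rw [hr1]
    unfold pvRanked1
    simp [List.mem_filter]
  have hsorted_perm := PySem.List.sorted_perm rest (fun x : Int => x) false
  have hmem_sorted : ∀ x, x ∈ PySem.List.sorted rest (fun x : Int => x) false ↔ x ∈ rest :=
    fun x => hsorted_perm.mem_iff
  have hmem_rest : ∀ x, x ∈ rest ↔ (x ∈ available_days ∧ x ∉ oc) := by
    intro x
    rw [hrest]
    constructor
    · intro hx
      obtain ⟨hav, hnr⟩ := List.mem_filter.mp hx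
      refine ⟨hav, fun hoc => ?_⟩
      have hx1 : x ∈ r1 := (hmem_r1 x).mpr ⟨hoc, hav⟩
      simp [hx1] at hnr
    · rintro ⟨hav, hnoc⟩
      refine List.mem_filter.mpr ⟨hav, ?_⟩
      simp only [Bool.not_eq_eq_eq_not, Bool.not_true, List.contains_eq_mem,
        decide_eq_false_iff_not]
      exact fun hr => hnoc ((hmem_r1 x).mp hr).1
  unfold pvRanked
  rw [← hr1, ← hrest, List.filter_append, List.head?_append]
  cases hh : ((r1.filter q)).head? with
  | some d =>
    simp only [Option.some_or]
    obtain ⟨hdr1, hqd⟩ := pv_head_filter r1 q d hh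
    have hdoc : d ∈ oc := ((hmem_r1 d).mp hdr1).1
    have hdav : d ∈ available_days := ((hmem_r1 d).mp hdr1).2
    symm
    apply pv_min2_eq_some
    · exact List.mem_filter.mpr ⟨hdav, hqd⟩
    · intro e he
      obtain ⟨heav, hqe⟩ := List.mem_filter.mp he
      by_cases heoc : e ∈ oc
      · -- both candidates: first-occurrence ranks compare; equal ranks force e = d
        have her1 : e ∈ r1 := (hmem_r1 e).mpr ⟨heoc, heav⟩
        have hh' : ((oc.filter (fun a => q a && available_days.contains a)).head? = some d) := by
          rw [hr1] at hh
          unfold pvRanked1 at hh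
          rwa [List.filter_filter] at hh
        have hrank := pv_head_rank_min oc _ d hh' e heoc (by simp [heav, hqe])
        simp only [pvLexLe]
        rcases lt_or_eq_of_le hrank with h' | h'
        · exact Or.inl h'
        · have := pvRank_inj oc d e hdoc heoc h'
          exact Or.inr ⟨h', by omega⟩
      · -- e is a non-candidate: its rank is the length, strictly above d's
        have := pvRank_lt_of_mem oc d hdoc
        simp only [pvLexLe]
        rw [pvRank_of_not_mem oc e heoc]
        exact Or.inl (by omega)
  | none =>
    simp only [Option.none_or]
    -- no available candidate passes q
    have hnone : ∀ x ∈ oc, x ∈ available_days → q x = true → False := by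
      intro x hxoc hxav hqx
      have hxr1 : x ∈ r1.filter q := List.mem_filter.mpr ⟨(hmem_r1 x).mpr ⟨hxoc, hxav⟩, hqx⟩
      cases hl : r1.filter q with
      | nil => rw [hl] at hxr1; simp at hxr1
      | cons a t => rw [hl] at hh; simp at hh
    cases hh2 : ((PySem.List.sorted rest (fun x : Int => x) false).filter q).head? with
    | some d =>
      obtain ⟨hds, hqd⟩ := pv_head_filter _ q d hh2
      have hdrest : d ∈ rest := (hmem_sorted d).mp hds
      obtain ⟨hdav, hdoc⟩ := (hmem_rest d).mp hdrest
      symm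
      apply pv_min2_eq_some
      · exact List.mem_filter.mpr ⟨hdav, hqd⟩
      · intro e he
        obtain ⟨heav, hqe⟩ := List.mem_filter.mp he
        have heoc : e ∉ oc := fun h => hnone e h heav hqe
        simp only [pvLexLe]
        rw [pvRank_of_not_mem oc d hdoc, pvRank_of_not_mem oc e heoc]
        refine Or.inr ⟨rfl, ?_⟩
        exact pv_head_sorted_filter_le _ q d
          (PySem.List.sorted_pairwise rest (fun x : Int => x)) hh2 e
          ((hmem_sorted e).mpr ((hmem_rest e).mpr ⟨heav, heoc⟩)) hqe
    | none =>
      -- both sides empty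
      symm
      rw [pv_min2_eq_none_iff]
      by_contra hne
      obtain ⟨a, hmem⟩ := List.exists_mem_of_ne_nil _ hne
      obtain ⟨haav, hqa⟩ := List.mem_filter.mp hmem
      have haoc : a ∉ oc := fun h => hnone a h haav hqa
      have : a ∈ (PySem.List.sorted rest (fun x : Int => x) false).filter q :=
        List.mem_filter.mpr ⟨(hmem_sorted a).mpr ((hmem_rest a).mpr ⟨haav, haoc⟩), hqa⟩
      cases hl : (PySem.List.sorted rest (fun x : Int => x) false).filter q with
      | nil => rw [hl] at this; simp at this
      | cons b t => rw [hl] at hh2; simp at hh2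

-- ===== VERDICT (by name: the statement is the Claim_ definition above) =====
theorem choose_day_for_session_py_spec : Claim_equal_choose_day_for_session_py := by
  intro available_days ordered_candidates is_quality quality_days _ hpre
  unfold Spec_choose_day_for_session_py
  unfold choose_day_for_session_py choose_day_for_session_py_alt
  simp only [funext (pvPriority_getD ordered_candidates)]
  have hfull := pv_core available_days ordered_candidates (fun _ => true)
  simp only [List.filter_true] at hfull
  cases is_quality with
  | false =>
    simp only [Bool.not_false, if_true, Bool.false_eq_true, if_false]
    rw [pv_pyGet?_zero, hfull]
  | true =>
    simp only [Bool.not_true, Bool.false_eq_true, if_false, if_true]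
    have hq := pv_core available_days ordered_candidates
      (fun d => !(quality_days.contains (d - 1)) && !(quality_days.contains (d + 1)))
    have hpred : (fun d => !(quality_days.contains (d - 1) || quality_days.contains (d + 1)))
        = (fun d => !(quality_days.contains (d - 1)) && !(quality_days.contains (d + 1))) := by
      funext d; rw [Bool.not_or]
    rw [hpred]
    by_cases hsafe : available_days.filter
        (fun d => !(quality_days.contains (d - 1)) && !(quality_days.contains (d + 1))) ≠ []
    · rw [if_pos hsafe]
      have hAne : (pvRanked available_days ordered_candidates).filter
          (fun d => !(quality_days.contains (d - 1)) && !(quality_days.contains (d + 1))) ≠ [] := by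
        intro hA
        apply hsafe
        rw [hA] at hq
        simp only [List.head?_nil] at hq
        exact (pv_min2_eq_none_iff _ _).mp hq.symm
      rw [if_pos hAne, pv_pyGet?_zero, hq]
    · rw [if_neg hsafe]
      rw [not_ne_iff] at hsafe
      have hA : (pvRanked available_days ordered_candidates).filter
          (fun d => !(quality_days.contains (d - 1)) && !(quality_days.contains (d + 1))) = [] := by
        cases hl : (pvRanked available_days ordered_candidates).filter
            (fun d => !(quality_days.contains (d - 1)) && !(quality_days.contains (d + 1))) with
        | nil => rfl
        | cons b t =>
          exfalso
          rw [hsafe, hl] at hq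
          simp [PySem.List.min2?] at hq
      rw [if_neg (not_ne_iff.mpr hA), pv_pyGet?_zero, hfull]
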